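-- pv_equiv track=rewrite | github.com/smmhatami/DNA_Storage | main.py | convert_to_base_ten
-- ===== SOURCE A (Python) =====
-- def convert_to_base_ten(number):
--     result = 0
--     i = 0
--     while number > 0:
--         result = result + (number % 10) * 4 ** i
--         number = number // 10
--         i = i + 1
--     return result
-- ===== SOURCE B (Python) =====
-- def convert_to_base_ten(number):
--     if number <= 0:
--         return 0
--     return convert_to_base_ten(number // 10) * 4 + number % 10
-- ===== Notes on version B (the rewrite author's own statement) =====
-- stated objective: simpler
-- what changed: Replaced the iterative loop that accumulates each digit weighted by a recomputed power of the base with a direct recursive Horner evaluation over the decimal digits, eliminating the power computation and the loop state entirely.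
import Mathlib
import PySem

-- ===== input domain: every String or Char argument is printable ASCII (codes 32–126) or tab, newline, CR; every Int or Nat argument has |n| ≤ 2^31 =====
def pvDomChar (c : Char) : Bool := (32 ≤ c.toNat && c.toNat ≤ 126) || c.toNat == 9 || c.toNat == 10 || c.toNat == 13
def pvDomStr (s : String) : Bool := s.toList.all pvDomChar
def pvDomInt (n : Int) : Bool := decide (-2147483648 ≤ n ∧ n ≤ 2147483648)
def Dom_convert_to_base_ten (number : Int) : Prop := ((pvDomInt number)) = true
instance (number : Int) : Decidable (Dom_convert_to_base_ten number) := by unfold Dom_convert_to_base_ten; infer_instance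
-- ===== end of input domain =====

-- B replaces A's weighted-power loop with a recursive Horner evaluation (simpler; same values).


-- ===== PORT A =====
-- A's while loop over its state (result, i); fuel = number.toNat bounds the iteration count
-- (the loop strictly decreases a positive number by //10), keeping the recursion structural;
-- 4 ** i is ported as 4 ^ i.toNat (i starts at 0 and only increases).
def convertLoopA : Nat → Int → Int → Int → Int
  | 0, _, result, _ => result
  | fuel + 1, number, result, i =>
    if number > 0 then
      convertLoopA fuel (PySem.Int.floordiv number 10)
        (result + PySem.Int.mod number 10 * 4 ^ i.toNat) (i + 1)
    else result

def convert_to_base_ten (number : Int) : Int := convertLoopA number.toNat number 0 0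

-- ===== PORT B =====
-- B's recursion on number//10, with the same structural fuel bound.
def convertHornerB : Nat → Int → Int
  | 0, _ => 0
  | fuel + 1, n =>
    if n ≤ 0 then 0
    else convertHornerB fuel (PySem.Int.floordiv n 10) * 4 + PySem.Int.mod n 10

def convert_to_base_ten_alt (number : Int) : Int := convertHornerB number.toNat number

-- ===== PRECONDITION & SPEC =====
def Spec_convert_to_base_ten (number : Int) (out : Int) : Prop := out = convert_to_base_ten_alt number
instance (number : Int) (out : Int) : Decidable (Spec_convert_to_base_ten number out) := by unfold Spec_convert_to_base_ten; infer_instance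

-- ===== CLAIM (what is proved, stated in full; the proofs are below) =====
def Claim_equal_convert_to_base_ten : Prop := ∀ (number : Int), Dom_convert_to_base_ten number → Spec_convert_to_base_ten number (convert_to_base_ten number)

-- ===== LEMMAS AND PROOFS =====

theorem floordiv_ten_toNat_lt (n : Int) (hn : n > 0) :
    (PySem.Int.floordiv n 10).toNat < n.toNat := by
  rw [PySem.Int.floordiv_eq_ediv_of_pos (by omega : (0:Int) < 10)]
  omega

-- the fuel is irrelevant once it covers n
theorem convertHornerB_fuel (f : Nat) : ∀ (n : Int) (f' : Nat), n.toNat ≤ f → n.toNat ≤ f' →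
    convertHornerB f n = convertHornerB f' n := by
  induction f with
  | zero =>
    intro n f' hf _
    have hn : n ≤ 0 := by omega
    cases f' with
    | zero => rfl
    | succ f' => simp [convertHornerB, hn]
  | succ f ih =>
    intro n f' hf hf'
    cases f' with
    | zero =>
      have hn : n ≤ 0 := by omega
      simp [convertHornerB, hn]
    | succ f' =>
      by_cases hn : n ≤ 0
      · simp [convertHornerB, hn]
      · have hlt := floordiv_ten_toNat_lt n (by omega)
        simp only [convertHornerB, hn, if_neg, not_false_iff]
        rw [ih (PySem.Int.floordiv n 10) f' (by omega) (by omega)]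

theorem alt_of_nonpos (n : Int) (hn : n ≤ 0) : convert_to_base_ten_alt n = 0 := by
  unfold convert_to_base_ten_alt
  have h0 : n.toNat = 0 := by omega
  rw [h0]
  rfl

theorem alt_of_pos (n : Int) (hn : 0 < n) :
    convert_to_base_ten_alt n =
      convert_to_base_ten_alt (PySem.Int.floordiv n 10) * 4 + PySem.Int.mod n 10 := by
  unfold convert_to_base_ten_alt
  obtain ⟨m, hm⟩ : ∃ m, n.toNat = m + 1 := ⟨n.toNat - 1, by omega⟩
  have hlt := floordiv_ten_toNat_lt n hn
  have hne : ¬ n ≤ 0 := by omega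
  rw [hm]
  simp only [convertHornerB, if_neg hne]
  rw [convertHornerB_fuel m (PySem.Int.floordiv n 10) (PySem.Int.floordiv n 10).toNat
        (by omega) le_rfl]

theorem convertLoopA_eq (k : Nat) :
    ∀ (fuel : Nat) (n r i : Int), n.toNat ≤ k → n.toNat ≤ fuel → 0 ≤ i →
      convertLoopA fuel n r i = r + convert_to_base_ten_alt n * 4 ^ i.toNat := by
  induction k with
  | zero =>
    intro fuel n r i hk hf hi
    have hn : n ≤ 0 := by omega
    rw [alt_of_nonpos n hn]
    have hng : ¬ n > 0 := by omega
    cases fuel with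
    | zero => simp [convertLoopA]
    | succ fuel => simp [convertLoopA, hng]
  | succ k ih =>
    intro fuel n r i hk hf hi
    by_cases hn : n > 0
    · obtain ⟨f, hfm⟩ : ∃ f, fuel = f + 1 := ⟨fuel - 1, by omega⟩
      have hlt := floordiv_ten_toNat_lt n hn
      subst hfm
      simp only [convertLoopA, hn, if_pos]
      rw [ih f (PySem.Int.floordiv n 10) _ _ (by omega) (by omega) (by omega)]
      rw [alt_of_pos n hn]
      have hip : (i + 1).toNat = i.toNat + 1 := by omega
      rw [hip, pow_succ]
      ring
    · rw [alt_of_nonpos n (by omega)]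
      cases fuel with
      | zero => simp [convertLoopA]
      | succ fuel => simp [convertLoopA, hn]

-- ===== VERDICT (by name: the statement is the Claim_ definition above) =====
theorem convert_to_base_ten_spec : Claim_equal_convert_to_base_ten := by
  intro n _
  unfold Spec_convert_to_base_ten convert_to_base_ten
  rw [convertLoopA_eq n.toNat n.toNat n 0 0 le_rfl le_rfl le_rfl]
  simp
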